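-- pv_equiv track=rewrite | github.com/NewOld21/kshbaekhub | 백준/Gold/21315. 카드 섞기/카드 섞기.py | bland_card
-- ===== SOURCE A (Python) =====
-- def bland_card(prev, i, k):
--
--     if i > k + 1:             # (재귀 종료 조건) 모든 단계 완료
--         return prev
--
--     if i == 1:                # 첫 번째 단계에서는 맨 뒤에서 2^k 장 잘라내기
--         cnt = 2 ** k
--     else:                     # i번째 단계에서는 2^(k-i+1) 장 잘라내기
--         cnt = 2 ** (k-i+1)
--
--     size = len(prev)
--     next = prev[size-cnt:]    # 잘라낸 부분
--     rest = prev[:size-cnt]    # 남은 부분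
--
--     # 잘린 부분(next)을 앞으로, 나머지(rest)는 뒤로
--     return bland_card(next, i+1, k) + rest
-- ===== SOURCE B (Python) =====
-- def bland_card(prev, i, k):
--     cur = prev
--     rests = []
--     for j in range(i, k + 2):
--         cnt = 2 ** k if j == 1 else 2 ** (k - j + 1)
--         cut = len(cur) - cnt
--         rests.append(cur[:cut])
--         cur = cur[cut:]
--     for r in reversed(rests):
--         cur = cur + r
--     return cur
-- ===== Notes on version B (the rewrite author's own statement) =====
-- stated objective: alternative
-- what changed: Replaces the recursion with a single iterative loop over range(i, k+2) that accumulates the cut-off rest blocks in a list and concatenates them back in reverse order after the loop.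
-- outside the precondition, e.g. on bland_card([5], 0, 920): A returns [5], B returns [5]
import Mathlib
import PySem

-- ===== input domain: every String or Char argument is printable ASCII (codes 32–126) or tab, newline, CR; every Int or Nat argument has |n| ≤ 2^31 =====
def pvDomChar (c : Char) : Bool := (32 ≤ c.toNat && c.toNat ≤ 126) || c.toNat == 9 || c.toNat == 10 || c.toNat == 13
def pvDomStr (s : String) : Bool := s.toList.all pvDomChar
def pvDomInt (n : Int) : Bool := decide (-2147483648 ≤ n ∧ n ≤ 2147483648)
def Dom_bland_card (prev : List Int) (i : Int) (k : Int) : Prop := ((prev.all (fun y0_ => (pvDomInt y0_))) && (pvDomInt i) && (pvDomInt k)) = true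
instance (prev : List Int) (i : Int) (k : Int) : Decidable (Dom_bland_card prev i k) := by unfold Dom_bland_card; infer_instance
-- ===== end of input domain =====

-- B replaces A's recursion by one iterative loop over range(i, k+2) that accumulates
-- the rest blocks and concatenates them back in reverse order after the loop (objective: alternative).

-- ===== PORT A =====
-- In every branch that computes 2**e the exponent is ≥ 0 (i = 1 with i ≤ k+1 forces
-- k ≥ 0; otherwise i ≤ k+1 gives k-i+1 ≥ 0), so Int.toNat on the exponent is exact.
def bland_card (prev : List Int) (i : Int) (k : Int) : List Int :=
  if i > k + 1 then prev
  else
    let cnt : Int := if i = 1 then (2:Int) ^ k.toNat else (2:Int) ^ (k - i + 1).toNat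
    let size : Int := (prev.length : Int)
    let next := PySem.List.slice prev (some (size - cnt)) none
    let rest := PySem.List.slice prev none (some (size - cnt))
    bland_card next (i+1) k ++ rest
termination_by (k + 2 - i).toNat
decreasing_by simp_wf; omega

-- ===== PORT B =====
def bland_card_alt (prev : List Int) (i : Int) (k : Int) : List Int :=
  let st :=
    (PySem.List.pyRange i (k + 2) 1).foldl
      (fun (st : List Int × List (List Int)) j =>
        let cur := st.1
        let cnt : Int := if j = 1 then (2:Int) ^ k.toNat else (2:Int) ^ (k - j + 1).toNat
        let cut : Int := (cur.length : Int) - cnt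
        (PySem.List.slice cur (some cut) none, st.2 ++ [PySem.List.slice cur none (some cut)]))
      (prev, [])
  st.2.reverse.foldl (fun c r => c ++ r) st.1

-- ===== PRECONDITION & SPEC =====
-- Pre_ excludes inputs with more than 900 recursion levels (k + 2 - i > 900): there A
-- hits (or, just past 900, approaches) Python's recursion limit and raises RecursionError;
-- near the boundary A still returns and B returns the same value (see cites).
def Pre_bland_card (prev : List Int) (i : Int) (k : Int) : Prop := k + 2 - i ≤ 900
instance (prev : List Int) (i : Int) (k : Int) : Decidable (Pre_bland_card prev i k) := by unfold Pre_bland_card; infer_instance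
def pvWitness_bland_card : List Int × Int × Int := ([1, 2, 3, 4, 5, 6, 7, 8], 1, 3)

def Spec_bland_card (prev : List Int) (i : Int) (k : Int) (out : List Int) : Prop := out = bland_card_alt prev i k
instance (prev : List Int) (i : Int) (k : Int) (out : List Int) : Decidable (Spec_bland_card prev i k out) := by unfold Spec_bland_card; infer_instance

-- ===== CLAIM (what is proved, stated in full; the proofs are below) =====
def Claim_equal_bland_card : Prop := ∀ (prev : List Int) (i : Int) (k : Int), Dom_bland_card prev i k → Pre_bland_card prev i k → Spec_bland_card prev i k (bland_card prev i k)

-- ===== LEMMAS AND PROOFS =====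

theorem foldl_app_flatten (L : List (List Int)) (c : List Int) :
    L.foldl (fun c r => c ++ r) c = c ++ L.flatten := by
  induction L generalizing c with
  | nil => simp
  | cons h t ih => simp [ih, List.append_assoc]

theorem bland_step (prev : List Int) (i k : Int) (h : ¬ i > k + 1) :
    bland_card prev i k =
      bland_card (PySem.List.slice prev (some ((prev.length : Int) - (if i = 1 then (2:Int) ^ k.toNat else (2:Int) ^ (k - i + 1).toNat))) none) (i + 1) k
        ++ PySem.List.slice prev none (some ((prev.length : Int) - (if i = 1 then (2:Int) ^ k.toNat else (2:Int) ^ (k - i + 1).toNat))) := by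
  rw [bland_card, if_neg h]

-- the invariant: running B's loop from state (cur, rests) finishes with
-- bland_card cur i k followed by the already-accumulated rests (reversed, flattened)
theorem bland_key (k : Int) : ∀ (n : Nat) (i : Int) (cur : List Int) (rests : List (List Int)),
    (k + 2 - i).toNat = n →
    (let st :=
      (PySem.List.pyRange i (k + 2) 1).foldl
        (fun (st : List Int × List (List Int)) j =>
          let cur := st.1
          let cnt : Int := if j = 1 then (2:Int) ^ k.toNat else (2:Int) ^ (k - j + 1).toNat
          let cut : Int := (cur.length : Int) - cnt
          (PySem.List.slice cur (some cut) none, st.2 ++ [PySem.List.slice cur none (some cut)]))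
        (cur, rests)
     st.2.reverse.foldl (fun c r => c ++ r) st.1)
    = bland_card cur i k ++ rests.reverse.flatten := by
  intro n
  induction n with
  | zero =>
    intro i cur rests hn
    have hge : k + 2 ≤ i := by omega
    rw [PySem.List.pyRange_one_eq_nil hge]
    rw [bland_card]
    simp only [List.foldl_nil]
    rw [if_pos (by omega : i > k + 1)]
    exact foldl_app_flatten _ _
  | succ n ih =>
    intro i cur rests hn
    have hlt : i < k + 2 := by omega
    rw [PySem.List.pyRange_one_cons hlt]
    rw [List.foldl_cons]
    rw [ih (i + 1) _ _ (by omega)]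
    rw [bland_step cur i k (by omega)]
    simp [List.append_assoc]

theorem bland_card_spec' (prev : List Int) (i k : Int) :
    bland_card prev i k = bland_card_alt prev i k := by
  unfold bland_card_alt
  rw [bland_key k (k + 2 - i).toNat i prev [] rfl]
  simp

-- ===== VERDICT (by name: the statement is the Claim_ definition above) =====
theorem bland_card_spec : Claim_equal_bland_card := by
  intro prev i k _ _
  show bland_card prev i k = bland_card_alt prev i k
  exact bland_card_spec' prev i k
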